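-- pv_equiv track=rewrite | github.com/leanprover-community/mathlib-ci | scripts/pr_summary/olean_diff.py | make_comment
-- ===== SOURCE A (Python) =====
-- GITHUB_COMMENT_LIMIT = 65000
--
-- def build_report(added, removed, interface_changed, nonpublic_changed,
--                  omitted_interface=0, omitted_nonpublic=0):
--     lines = ['## Olean diff', '']
--
--     total_interface = len(interface_changed) + omitted_interface
--     total_nonpublic = len(nonpublic_changed) + omitted_nonpublic
--
--     if not total_interface and not added and not removed and not total_nonpublic:
--         lines.append('No differences found.')
--         return '\n'.join(lines)
--
--     summary = []
--     if total_interface: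
--         summary.append(f'{total_interface} module{"s" if total_interface != 1 else ""} with public interface changes')
--     if added:
--         summary.append(f'{len(added)} added')
--     if removed:
--         summary.append(f'{len(removed)} removed')
--     if summary:
--         lines.append(', '.join(summary) + '.')
--         lines.append('')
--
--     if interface_changed or omitted_interface:
--         suffix = ' (truncated, see full report)' if omitted_interface else ''
--         lines.append(f'<details><summary>{total_interface} module{"s" if total_interface != 1 else ""} with public interface changes{suffix}</summary>')
--         lines.append('')
--         lines.append('Exported signatures, declarations, or axioms changed.')
--         lines.append('')
--         lines += [f'- `{m}`' for m in interface_changed]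
--         if omitted_interface:
--             lines.append(f'- … and {omitted_interface} more (see full report)')
--         lines.append('')
--         lines.append('</details>')
--         lines.append('')
--
--     if added:
--         lines += ['<details><summary>Added modules</summary>', '']
--         lines += [f'- `{m}`' for m in added]
--         lines.append('')
--         lines.append('</details>')
--         lines.append('')
--
--     if removed:
--         lines += ['<details><summary>Removed modules</summary>', '']
--         lines += [f'- `{m}`' for m in removed]
--         lines.append('')
--         lines.append('</details>')
--         lines.append('')
--
--     if total_nonpublic:
--         suffix = ' (truncated, see full report)' if omitted_nonpublic else ''
--         lines.append(f'<details><summary>{total_nonpublic} non-public change{"s" if total_nonpublic != 1 else ""}{suffix}</summary>')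
--         lines.append('')
--         lines.append('Public `.olean` unchanged; proof bodies, docstrings, or declaration ranges changed.')
--         lines.append('')
--         lines += [f'- `{m}`' for m in nonpublic_changed]
--         lines.append('')
--         lines.append('</details>')
--
--     return '\n'.join(lines)
--
-- def make_comment(added, removed, interface_changed, nonpublic_changed, limit=GITHUB_COMMENT_LIMIT):
--     full = build_report(added, removed, interface_changed, nonpublic_changed)
--     if len(full) <= limit:
--         return full
--
--     # Binary search: truncate non-public list first.
--     lo, hi = 0, len(nonpublic_changed)
--     while lo < hi:
--         mid = (lo + hi + 1) // 2
--         r = build_report(added, removed, interface_changed, nonpublic_changed[:mid],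
--                          omitted_nonpublic=len(nonpublic_changed) - mid)
--         if len(r) <= limit:
--             lo = mid
--         else:
--             hi = mid - 1
--     candidate = build_report(added, removed, interface_changed, nonpublic_changed[:lo],
--                               omitted_nonpublic=len(nonpublic_changed) - lo)
--     if len(candidate) <= limit:
--         return candidate
--
--     # Still too long: truncate interface list too.
--     lo, hi = 0, len(interface_changed)
--     while lo < hi:
--         mid = (lo + hi + 1) // 2
--         r = build_report(added, removed, interface_changed[:mid], [],
--                          omitted_interface=len(interface_changed) - mid,
--                          omitted_nonpublic=len(nonpublic_changed))
--         if len(r) <= limit: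
--             lo = mid
--         else:
--             hi = mid - 1
--     return build_report(added, removed, interface_changed[:lo], [],
--                         omitted_interface=len(interface_changed) - lo,
--                         omitted_nonpublic=len(nonpublic_changed))
-- ===== SOURCE B (Python) =====
-- GITHUB_COMMENT_LIMIT = 65000
--
-- def build_report(added, removed, interface_changed, nonpublic_changed,
--                  omitted_interface=0, omitted_nonpublic=0):
--     # Module helper shared with A: renders the report text (B calls it O(1) times).
--     lines = ['## Olean diff', '']
--
--     total_interface = len(interface_changed) + omitted_interface
--     total_nonpublic = len(nonpublic_changed) + omitted_nonpublic
--
--     if not total_interface and not added and not removed and not total_nonpublic: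
--         lines.append('No differences found.')
--         return '\n'.join(lines)
--
--     summary = []
--     if total_interface:
--         summary.append(f'{total_interface} module{"s" if total_interface != 1 else ""} with public interface changes')
--     if added:
--         summary.append(f'{len(added)} added')
--     if removed:
--         summary.append(f'{len(removed)} removed')
--     if summary:
--         lines.append(', '.join(summary) + '.')
--         lines.append('')
--
--     if interface_changed or omitted_interface:
--         suffix = ' (truncated, see full report)' if omitted_interface else ''
--         lines.append(f'<details><summary>{total_interface} module{"s" if total_interface != 1 else ""} with public interface changes{suffix}</summary>')
--         lines.append('')
--         lines.append('Exported signatures, declarations, or axioms changed.')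
--         lines.append('')
--         lines += [f'- `{m}`' for m in interface_changed]
--         if omitted_interface:
--             lines.append(f'- … and {omitted_interface} more (see full report)')
--         lines.append('')
--         lines.append('</details>')
--         lines.append('')
--
--     if added:
--         lines += ['<details><summary>Added modules</summary>', '']
--         lines += [f'- `{m}`' for m in added]
--         lines.append('')
--         lines.append('</details>')
--         lines.append('')
--
--     if removed:
--         lines += ['<details><summary>Removed modules</summary>', '']
--         lines += [f'- `{m}`' for m in removed]
--         lines.append('')
--         lines.append('</details>')
--         lines.append('')
--
--     if total_nonpublic:
--         suffix = ' (truncated, see full report)' if omitted_nonpublic else ''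
--         lines.append(f'<details><summary>{total_nonpublic} non-public change{"s" if total_nonpublic != 1 else ""}{suffix}</summary>')
--         lines.append('')
--         lines.append('Public `.olean` unchanged; proof bodies, docstrings, or declaration ranges changed.')
--         lines.append('')
--         lines += [f'- `{m}`' for m in nonpublic_changed]
--         lines.append('')
--         lines.append('</details>')
--
--     return '\n'.join(lines)
--
-- def make_comment(added, removed, interface_changed, nonpublic_changed, limit=GITHUB_COMMENT_LIMIT):
--     full = build_report(added, removed, interface_changed, nonpublic_changed)
--     if len(full) <= limit:
--         return full
--
--     # While some non-public entries stay omitted, keeping one more of them only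
--     # inserts its bullet line '- `<module>`\n' (len(module) + 5 characters) into an
--     # otherwise fixed text.  So render the skeleton (no kept entries) once and price
--     # every cut-off in O(1) with a running sum instead of re-rendering per probe.
--     n = len(nonpublic_changed)
--     base = len(build_report(added, removed, interface_changed, [], omitted_nonpublic=n))
--     keep, acc = 0, 0
--     for j, mod in enumerate(nonpublic_changed[:-1]):
--         acc += len(mod) + 5
--         if base + acc <= limit:
--             keep = j + 1
--     if keep > 0 or base <= limit:
--         return build_report(added, removed, interface_changed, nonpublic_changed[:keep],
--                             omitted_nonpublic=n - keep)
--
--     # Same pricing for the interface list; here the '… and X more' count shrinks as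
--     # entries are kept, so the cost of a cut-off also tracks the width of that number.
--     m = len(interface_changed)
--     base2 = len(build_report(added, removed, [], [], omitted_interface=m,
--                              omitted_nonpublic=n))
--     keep, acc = 0, 0
--     for j, mod in enumerate(interface_changed[:-1]):
--         acc += len(mod) + 5
--         if base2 + acc + len(str(m - j - 1)) - len(str(m)) <= limit:
--             keep = j + 1
--     return build_report(added, removed, interface_changed[:keep], [],
--                         omitted_interface=m - keep, omitted_nonpublic=n)
-- ===== Notes on version B (the rewrite author's own statement) =====
-- stated objective: faster
-- what changed: Instead of A's binary searches that re-render the whole report at every probe, B renders the truncation skeleton once, prices every cut-off point in O(1) from a running sum of bullet-line lengths (plus the width of the omitted count for the interface list), picks the longest fitting prefix by a single linear scan, and renders the final report once.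
import Mathlib
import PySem

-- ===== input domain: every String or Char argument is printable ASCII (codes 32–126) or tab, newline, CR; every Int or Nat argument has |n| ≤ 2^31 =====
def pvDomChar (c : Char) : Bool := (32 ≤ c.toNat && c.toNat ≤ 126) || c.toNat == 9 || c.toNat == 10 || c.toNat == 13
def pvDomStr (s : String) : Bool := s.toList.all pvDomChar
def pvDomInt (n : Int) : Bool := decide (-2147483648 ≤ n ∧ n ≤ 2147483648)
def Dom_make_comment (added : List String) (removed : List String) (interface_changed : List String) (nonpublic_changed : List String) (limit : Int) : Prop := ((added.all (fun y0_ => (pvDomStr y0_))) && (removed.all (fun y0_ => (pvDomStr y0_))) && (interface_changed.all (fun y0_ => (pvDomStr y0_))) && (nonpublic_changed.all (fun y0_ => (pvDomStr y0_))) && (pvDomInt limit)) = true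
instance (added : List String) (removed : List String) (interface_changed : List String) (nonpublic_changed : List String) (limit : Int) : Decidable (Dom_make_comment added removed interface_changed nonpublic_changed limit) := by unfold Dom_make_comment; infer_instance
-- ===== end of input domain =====

-- B replaces A's binary searches (each probe re-rendering the whole report) by one skeleton
-- rendering per phase, a linear scan that prices each cut-off point in O(1) from a running sum
-- of bullet-line lengths, and a single final rendering.

-- ===== PORT A =====
-- the short f-string pieces of build_report
def sumInterface (ti : Int) : List Char :=
  PySem.Int.toChars ti ++ " module".toList ++ (if ti ≠ 1 then ['s'] else []) ++ " with public interface changes".toList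

def truncSuffix : List Char := " (truncated, see full report)".toList

def hdrInterface (ti : Int) (suffix : List Char) : List Char :=
  "<details><summary>".toList ++ sumInterface ti ++ suffix ++ "</summary>".toList

def hdrNonpublic (tn : Int) (suffix : List Char) : List Char :=
  "<details><summary>".toList ++ PySem.Int.toChars tn ++ " non-public change".toList ++
    (if tn ≠ 1 then ['s'] else []) ++ suffix ++ "</summary>".toList

def omittedLine (oi : Int) : List Char :=
  "- … and ".toList ++ PySem.Int.toChars oi ++ " more (see full report)".toList

-- the bullet lines [f'- `{m}`' for m in mods]
def bullets (mods : List String) : List (List Char) :=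
  mods.map (fun m => "- `".toList ++ m.toList ++ ['`'])

-- module helper build_report (shared: Source B contains the identical helper and calls it O(1) times)
def buildReport (added removed interface_changed nonpublic_changed : List String) (oi on : Int) : String :=
  let ti : Int := PySem.List.len interface_changed + oi
  let tn : Int := PySem.List.len nonpublic_changed + on
  if ti = 0 ∧ added = [] ∧ removed = [] ∧ tn = 0 then
    String.ofList (PySem.Chars.join ['\n'] ["## Olean diff".toList, [], "No differences found.".toList])
  else
    let summary : List (List Char) :=
      (if ti ≠ 0 then [sumInterface ti] else []) ++
      (if added ≠ [] then [PySem.Int.toChars (PySem.List.len added) ++ " added".toList] else []) ++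
      (if removed ≠ [] then [PySem.Int.toChars (PySem.List.len removed) ++ " removed".toList] else [])
    let l1 : List (List Char) := ["## Olean diff".toList, []] ++
      (if summary ≠ [] then [PySem.Chars.join (", ".toList) summary ++ ['.'], []] else [])
    let l2 := l1 ++ (if interface_changed ≠ [] ∨ oi ≠ 0 then
        [hdrInterface ti (if oi ≠ 0 then truncSuffix else []), [],
         "Exported signatures, declarations, or axioms changed.".toList, []]
        ++ bullets interface_changed
        ++ (if oi ≠ 0 then [omittedLine oi] else [])
        ++ [[], "</details>".toList, []]
      else [])
    let l3 := l2 ++ (if added ≠ [] then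
        ["<details><summary>Added modules</summary>".toList, []] ++ bullets added
        ++ [[], "</details>".toList, []] else [])
    let l4 := l3 ++ (if removed ≠ [] then
        ["<details><summary>Removed modules</summary>".toList, []] ++ bullets removed
        ++ [[], "</details>".toList, []] else [])
    let l5 := l4 ++ (if tn ≠ 0 then
        [hdrNonpublic tn (if on ≠ 0 then truncSuffix else []), [],
         "Public `.olean` unchanged; proof bodies, docstrings, or declaration ranges changed.".toList, []]
        ++ bullets nonpublic_changed
        ++ [[], "</details>".toList] else [])
    String.ofList (PySem.Chars.join ['\n'] l5)

-- A's while-loop 'lo, hi = 0, n; while lo < hi: mid = (lo+hi+1)//2; …'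
def truncSearch (p : Nat → Bool) (lo hi : Nat) : Nat :=
  if _h : lo < hi then
    let mid := (lo + hi + 1) / 2
    if p mid then truncSearch p mid hi else truncSearch p lo (mid - 1)
  else lo
termination_by hi - lo
decreasing_by all_goals omega

def make_comment (added : List String) (removed : List String) (interface_changed : List String) (nonpublic_changed : List String) (limit : Int) : String :=
  let full := buildReport added removed interface_changed nonpublic_changed 0 0
  if PySem.Str.len full ≤ limit then full
  else
    let lo := truncSearch (fun mid =>
      decide (PySem.Str.len (buildReport added removed interface_changed
        (PySem.List.slice nonpublic_changed none (some (mid : Int))) 0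
        (PySem.List.len nonpublic_changed - (mid : Int))) ≤ limit)) 0 nonpublic_changed.length
    let candidate := buildReport added removed interface_changed
      (PySem.List.slice nonpublic_changed none (some (lo : Int))) 0
      (PySem.List.len nonpublic_changed - (lo : Int))
    if PySem.Str.len candidate ≤ limit then candidate
    else
      let lo2 := truncSearch (fun mid =>
        decide (PySem.Str.len (buildReport added removed
          (PySem.List.slice interface_changed none (some (mid : Int))) []
          (PySem.List.len interface_changed - (mid : Int))
          (PySem.List.len nonpublic_changed)) ≤ limit)) 0 interface_changed.length
      buildReport added removed
        (PySem.List.slice interface_changed none (some (lo2 : Int))) []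
        (PySem.List.len interface_changed - (lo2 : Int))
        (PySem.List.len nonpublic_changed)

-- ===== PORT B =====
def make_comment_alt (added : List String) (removed : List String) (interface_changed : List String) (nonpublic_changed : List String) (limit : Int) : String :=
  let full := buildReport added removed interface_changed nonpublic_changed 0 0
  if PySem.Str.len full ≤ limit then full
  else
    -- price every non-public cut-off from one skeleton rendering and a running sum
    let n := nonpublic_changed.length
    let base := PySem.Str.len (buildReport added removed interface_changed [] 0 (n : Int))
    let st := (PySem.List.enumerate (PySem.List.slice nonpublic_changed none (some (-1))) 0).foldl
      (fun (st : Int × Int) jm =>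
        let acc := st.2 + (PySem.Str.len jm.2 + 5)
        (if base + acc ≤ limit then jm.1 + 1 else st.1, acc)) (0, 0)
    if st.1 > 0 ∨ base ≤ limit then
      buildReport added removed interface_changed
        (PySem.List.slice nonpublic_changed none (some st.1)) 0 ((n : Int) - st.1)
    else
      -- same pricing for the interface list; the '… and X more' count narrows as entries are kept
      let m := interface_changed.length
      let base2 := PySem.Str.len (buildReport added removed [] [] (m : Int) (n : Int))
      let st2 := (PySem.List.enumerate (PySem.List.slice interface_changed none (some (-1))) 0).foldl
        (fun (st : Int × Int) jm =>
          let acc := st.2 + (PySem.Str.len jm.2 + 5)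
          (if base2 + acc + ((PySem.Int.toChars ((m : Int) - jm.1 - 1)).length : Int)
              - ((PySem.Int.toChars (m : Int)).length : Int) ≤ limit then jm.1 + 1 else st.1, acc))
        (0, 0)
      buildReport added removed
        (PySem.List.slice interface_changed none (some st2.1)) []
        ((m : Int) - st2.1) (n : Int)

-- ===== PRECONDITION & SPEC =====
def Spec_make_comment (added : List String) (removed : List String) (interface_changed : List String) (nonpublic_changed : List String) (limit : Int) (out : String) : Prop := out = make_comment_alt added removed interface_changed nonpublic_changed limit
instance (added : List String) (removed : List String) (interface_changed : List String) (nonpublic_changed : List String) (limit : Int) (out : String) : Decidable (Spec_make_comment added removed interface_changed nonpublic_changed limit out) := by unfold Spec_make_comment; infer_instance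

-- ===== CLAIM (what is proved, stated in full; the proofs are below) =====
def Claim_equal_make_comment : Prop := ∀ (added : List String) (removed : List String) (interface_changed : List String) (nonpublic_changed : List String) (limit : Int), Dom_make_comment added removed interface_changed nonpublic_changed limit → Spec_make_comment added removed interface_changed nonpublic_changed limit (make_comment added removed interface_changed nonpublic_changed limit)

-- ===== LEMMAS AND PROOFS =====

-- total length weight of the bullet lines of a module list (line '- `m`' plus newline)
def itemSumN (mods : List String) : Nat := (mods.map (fun m => m.toList.length + 5)).sum

-- proof-side closed form for the length of buildReport (never used by the ports)
def rlen (nA aS nR rS ti : Int) (icS : Nat) (oi : Int) (tn : Int) (npS : Nat) (onNe : Bool) : Int :=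
  if ti = 0 ∧ nA = 0 ∧ nR = 0 ∧ tn = 0 then 36
  else
    let summary : List (List Char) :=
      (if ti ≠ 0 then [sumInterface ti] else []) ++
      (if nA ≠ 0 then [PySem.Int.toChars nA ++ " added".toList] else []) ++
      (if nR ≠ 0 then [PySem.Int.toChars nR ++ " removed".toList] else [])
    15 + (if summary ≠ [] then ((PySem.Chars.join (", ".toList) summary).length : Int) + 3 else 0)
      + (if ti ≠ 0 then
          ((hdrInterface ti (if oi ≠ 0 then truncSuffix else [])).length : Int) + 1 + 56 + (icS : Int)
            + (if oi ≠ 0 then ((omittedLine oi).length : Int) + 1 else 0) + 13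
        else 0)
      + (if nA ≠ 0 then 43 + aS + 13 else 0)
      + (if nR ≠ 0 then 45 + rS + 13 else 0)
      + (if tn ≠ 0 then
          ((hdrNonpublic tn (if onNe then truncSuffix else [])).length : Int) + 1 + 86 + (npS : Int) + 12
        else 0)
      - 1

theorem joinNl_len (a : List Char) (t : List (List Char)) :
    (PySem.Chars.join ['\n'] (a :: t)).length + 1 = ((a :: t).map (fun l => l.length + 1)).sum := by
  induction t generalizing a with
  | nil => simp [PySem.Chars.join_singleton]
  | cons b t ih =>
    have h := ih b
    rw [PySem.Chars.join_cons_cons]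
    simp only [List.map_cons, List.sum_cons] at h ⊢
    simp only [List.length_append, List.length_cons, List.length_nil]
    omega

theorem joinNl_lenI (a : List Char) (t : List (List Char)) :
    PySem.Str.len (String.ofList (PySem.Chars.join ['\n'] (a :: t)))
      = ((((a :: t).map (fun l => l.length + 1)).sum : Nat) : Int) - 1 := by
  have h := joinNl_len a t
  simp only [PySem.Str.len, String.toList_ofList]
  omega

theorem bullets_sum (l : List String) :
    ((bullets l).map (fun c => c.length + 1)).sum = itemSumN l := by
  induction l with
  | nil => simp [bullets, itemSumN]
  | cons m t ih =>
    have e3 : "- `".toList.length = 3 := by decide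
    simp only [bullets, itemSumN, List.map_cons, List.sum_cons, List.length_append,
      List.length_cons, List.length_nil] at ih ⊢
    omega

-- the central length computation: rlen is exactly the length of buildReport
theorem buildReport_len (a r ic np : List String) (oi on : Int) (hoi : 0 ≤ oi) :
    PySem.Str.len (buildReport a r ic np oi on)
      = rlen (a.length : Int) (itemSumN a : Int) (r.length : Int) (itemSumN r : Int)
          ((ic.length : Int) + oi) (itemSumN ic) oi ((np.length : Int) + on) (itemSumN np)
          (decide (on ≠ 0)) := by
  have hadd : ((a.length : Int) = 0) ↔ (a = []) := by simp
  have hrem : ((r.length : Int) = 0) ↔ (r = []) := by simp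
  have hic : ((ic.length : Int) + oi ≠ 0) ↔ (ic ≠ [] ∨ oi ≠ 0) := by
    rcases List.eq_nil_or_concat ic with h | ⟨l, x, h⟩ <;> subst h <;> simp <;> omega
  have hon : ((decide (on ≠ 0)) = true) ↔ (on ≠ 0) := by simp
  have e13 : "## Olean diff".toList.length = 13 := by decide
  have e21 : "No differences found.".toList.length = 21 := by decide
  have e53 : "Exported signatures, declarations, or axioms changed.".toList.length = 53 := by decide
  have e83 : "Public `.olean` unchanged; proof bodies, docstrings, or declaration ranges changed.".toList.length = 83 := by decide
  have e41 : "<details><summary>Added modules</summary>".toList.length = 41 := by decide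
  have e43 : "<details><summary>Removed modules</summary>".toList.length = 43 := by decide
  have e10 : "</details>".toList.length = 10 := by decide
  simp only [rlen, buildReport, PySem.List.len, hadd, hrem, hic, hon, ne_eq,
    List.cons_append, List.nil_append, List.append_assoc, joinNl_lenI,
    List.map_append, List.map_cons, List.map_nil, List.sum_append, List.sum_cons, List.sum_nil,
    apply_ite PySem.Str.len,
    apply_ite (List.map (fun l : List Char => l.length + 1)), apply_ite (List.sum (α := Nat)),
    bullets_sum, List.length_append, List.length_cons, List.length_nil,
    e13, e21, e53, e83, e41, e43, e10, itemSumN]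
  split_ifs <;> push_cast <;> omega

-- the npS argument contributes additively (when the non-public section is present)
theorem rlen_np (nA aS nR rS ti : Int) (icS : Nat) (oi tn : Int) (npS npS' : Nat) (onNe : Bool) :
    rlen nA aS nR rS ti icS oi tn npS onNe
      = rlen nA aS nR rS ti icS oi tn npS' onNe
        + (if tn ≠ 0 then (npS : Int) - (npS' : Int) else 0) := by
  simp only [rlen]
  split_ifs <;> push_cast <;> omega

theorem omittedLine_length (x : Int) : (omittedLine x).length = (PySem.Int.toChars x).length + 31 := by
  simp only [omittedLine, List.length_append]
  have h1 : "- … and ".toList.length = 8 := by decide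
  have h2 : " more (see full report)".toList.length = 23 := by decide
  omega

-- the icS and oi arguments contribute through icS + |str(oi)| (both sections truncated)
theorem rlen_ic (nA aS nR rS ti : Int) (icS icS' : Nat) (oi oi' tn : Int) (npS : Nat) (onNe : Bool)
    (hti : ti ≠ 0) (hoi : oi ≠ 0) (hoi' : oi' ≠ 0) :
    rlen nA aS nR rS ti icS oi tn npS onNe
      = rlen nA aS nR rS ti icS' oi' tn npS onNe + ((icS : Int) - (icS' : Int))
        + (((PySem.Int.toChars oi).length : Int) - ((PySem.Int.toChars oi').length : Int)) := by
  simp only [rlen, omittedLine_length, if_pos hoi, if_pos hoi', if_neg hti,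
    hdrInterface]
  split_ifs <;> push_cast <;> omega

theorem truncSearch_le (p : Nat → Bool) (lo hi : Nat) (h : lo ≤ hi) :
    truncSearch p lo hi ≤ hi := by
  have main : ∀ d lo hi, hi - lo ≤ d → lo ≤ hi → truncSearch p lo hi ≤ hi := by
    intro d
    induction d with
    | zero =>
      intro lo hi h1 h2
      rw [truncSearch]
      have hn : ¬ lo < hi := by omega
      simp [hn]
      omega
    | succ d ih =>
      intro lo hi h1 h2
      rw [truncSearch]
      by_cases h3 : lo < hi
      · simp only [dif_pos h3]
        by_cases h4 : p ((lo + hi + 1) / 2)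
        · simp only [if_pos h4]
          exact ih _ _ (by omega) (by omega)
        · simp only [if_neg h4]
          have := ih lo ((lo + hi + 1) / 2 - 1) (by omega) (by omega)
          omega
      · simp [h3]; omega
  exact main (hi - lo) lo hi le_rfl h

-- the binary search on a prefix-true predicate: last-true characterisation
theorem truncSearch_spec (p : Nat → Bool) (lo hi : Nat)
    (hdc : ∀ i j, i ≤ j → j ≤ hi → p j = true → p i = true) (h : lo ≤ hi) :
    (truncSearch p lo hi = lo ∨ p (truncSearch p lo hi) = true) ∧
      (∀ t, truncSearch p lo hi < t → t ≤ hi → p t = false) := by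
  have main : ∀ d lo hi, hi - lo ≤ d → lo ≤ hi →
      (∀ i j, i ≤ j → j ≤ hi → p j = true → p i = true) →
      ((truncSearch p lo hi = lo ∨ p (truncSearch p lo hi) = true) ∧
        (∀ t, truncSearch p lo hi < t → t ≤ hi → p t = false)) := by
    intro d
    induction d with
    | zero =>
      intro lo hi h1 h2 hdc
      rw [truncSearch]
      have hn : ¬ lo < hi := by omega
      simp only [dif_neg hn]
      refine ⟨by simp, ?_⟩
      intro t ht1 ht2
      exact absurd ht2 (by omega)
    | succ d ih =>
      intro lo hi h1 h2 hdc
      rw [truncSearch]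
      by_cases h3 : lo < hi
      · simp only [dif_pos h3]
        by_cases h4 : p ((lo + hi + 1) / 2)
        · simp only [if_pos h4]
          obtain ⟨hor, hab⟩ := ih ((lo + hi + 1) / 2) hi (by omega) (by omega) hdc
          refine ⟨?_, hab⟩
          rcases hor with h | h
          · rw [h]; exact Or.inr h4
          · exact Or.inr h
        · simp only [if_neg h4]
          obtain ⟨hor, hab⟩ := ih lo ((lo + hi + 1) / 2 - 1) (by omega) (by omega)
            (fun i j hij hj hpj => hdc i j hij (by omega) hpj)
          refine ⟨hor, ?_⟩
          intro t ht1 ht2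
          rcases Nat.lt_or_ge t ((lo + hi + 1) / 2) with h5 | h5
          · exact hab t ht1 (by omega)
          · by_contra hc
            have hpt : p t = true := by
              cases hpt : p t
              · exact absurd hpt hc
              · rfl
            have := hdc ((lo + hi + 1) / 2) t h5 ht2 hpt
            rw [this] at h4
            exact h4 rfl
      · simp only [dif_neg h3]
        refine ⟨by simp, ?_⟩
        intro t ht1 ht2
        exact absurd ht2 (by omega)
  exact main (hi - lo) lo hi le_rfl h hdc

-- B's enumerate/foldl scan: running sum + last fitting cut-off
theorem enumFold_char (l : List String) (T : Int → Int → Prop) [inst : ∀ j a, Decidable (T j a)] :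
    ∃ K : Nat, ((PySem.List.enumerate l 0).foldl
        (fun (st : Int × Int) jm =>
          let acc := st.2 + (PySem.Str.len jm.2 + 5)
          (if T jm.1 acc then jm.1 + 1 else st.1, acc)) (0, 0))
      = ((K : Int), ((itemSumN l : Nat) : Int)) ∧ K ≤ l.length ∧
      (K = 0 ∨ (1 ≤ K ∧ T ((K : Int) - 1) ((itemSumN (l.take K) : Nat) : Int))) ∧
      (∀ t : Nat, K < t → t ≤ l.length → ¬ T ((t : Int) - 1) ((itemSumN (l.take t) : Nat) : Int)) := by
  induction l using List.reverseRecOn with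
  | nil =>
    refine ⟨0, ?_, by simp, Or.inl rfl, ?_⟩
    · simp [PySem.List.enumerate_nil, itemSumN]
    · intro t ht1 ht2
      simp at ht2
      omega
  | append_singleton xs x ih =>
    obtain ⟨K, hst, hKle, hK0, hKmax⟩ := ih
    have hsum : itemSumN (xs ++ [x]) = itemSumN xs + (x.toList.length + 5) := by
      simp [itemSumN]
    have hlenx : PySem.Str.len x = (x.toList.length : Int) := by
      simp [PySem.Str.len]
    rw [PySem.List.enumerate_append, PySem.List.enumerate_cons, PySem.List.enumerate_nil,
      List.foldl_append, hst]
    simp only [List.foldl_cons, List.foldl_nil]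
    have hacc : ((itemSumN xs : Nat) : Int) + (PySem.Str.len x + 5)
        = ((itemSumN (xs ++ [x]) : Nat) : Int) := by
      rw [hlenx, hsum]; push_cast; ring
    by_cases hT : T ((0 : Int) + (xs.length : Int)) (((itemSumN xs : Nat) : Int) + (PySem.Str.len x + 5))
    · refine ⟨xs.length + 1, ?_, by simp, Or.inr ⟨by omega, ?_⟩, ?_⟩
      · have hT' : T ((0 : Int) + (xs.length : Int)) ((itemSumN (xs ++ [x]) : Nat) : Int) := by
          rwa [hacc] at hT
        rw [hacc, if_pos hT']
        simp only [Prod.mk.injEq]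
        refine ⟨by push_cast; ring, trivial⟩
      · have htake : (xs ++ [x]).take (xs.length + 1) = xs ++ [x] := by
          apply List.take_of_length_le; simp
        rw [htake, ← hacc] at *
        have he : ((((xs.length + 1 : Nat)) : Int) - 1) = (0 : Int) + (xs.length : Int) := by
          push_cast; ring
        rw [he]
        exact hT
      · intro t ht1 ht2
        simp at ht2
        omega
    · refine ⟨K, ?_, by simp; omega, ?_, ?_⟩
      · have hT' : ¬ T ((0 : Int) + (xs.length : Int)) ((itemSumN (xs ++ [x]) : Nat) : Int) := by
          rwa [hacc] at hT
        rw [hacc, if_neg hT']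
      · rcases hK0 with h | ⟨h1, h2⟩
        · exact Or.inl h
        · refine Or.inr ⟨h1, ?_⟩
          rwa [List.take_append_of_le_length (by omega)]
      · intro t ht1 ht2
        rcases Nat.lt_or_ge t (xs.length + 1) with h5 | h5
        · rw [List.take_append_of_le_length (by omega)]
          exact hKmax t ht1 (by omega)
        · have ht : t = xs.length + 1 := by simp at ht2; omega
          subst ht
          have htake : (xs ++ [x]).take (xs.length + 1) = xs ++ [x] := by
            apply List.take_of_length_le; simp
          rw [htake]
          have he : ((((xs.length + 1 : Nat)) : Int) - 1) = (0 : Int) + (xs.length : Int) := by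
            push_cast; ring
          rw [he, ← hacc]
          exact hT

-- a binary search and a linear scan that agree on the predicate return the same cut-off
theorem search_eq (p : Nat → Bool) (N K : Nat)
    (hdc : ∀ i j, i ≤ j → j ≤ N → p j = true → p i = true)
    (hKle : K ≤ N - 1)
    (hK0 : K = 0 ∨ (1 ≤ K ∧ p K = true))
    (hKmax : ∀ t, K < t → t ≤ N - 1 → p t = false)
    (hpN : p N = false) :
    truncSearch p 0 N = K := by
  obtain ⟨hor, habove⟩ := truncSearch_spec p 0 N hdc (Nat.zero_le N)
  have hle := truncSearch_le p 0 N (Nat.zero_le N)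
  set rr := truncSearch p 0 N with hr
  rcases Nat.lt_trichotomy rr K with hlt | heq | hgt
  · rcases hK0 with h | ⟨h1, h2⟩
    · omega
    · have := habove K hlt (by omega)
      rw [this] at h2; exact absurd h2 (by simp)
  · exact heq
  · rcases hor with h | h
    · omega
    · rcases Nat.lt_or_ge rr N with hN | hN
      · have := hKmax rr hgt (by omega)
        rw [this] at h; exact absurd h (by simp)
      · have : rr = N := by omega
        rw [this] at h; rw [hpN] at h; exact absurd h (by simp)

-- digits facts: n < 10^(#digits n), and #digits grows by at most one per increment
theorem toDigitsCore_lt (f : Nat) : ∀ n : Nat, n < f → n < 10 ^ (Nat.toDigitsCore 10 f n []).length := by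
  induction f with
  | zero => intro n h; omega
  | succ f ih =>
    intro n h
    simp only [Nat.toDigitsCore]
    by_cases h10 : n / 10 = 0
    · simp only [h10, if_true, List.length_cons, List.length_nil]
      have : n < 10 := by omega
      simpa using this
    · simp only [h10, if_false]
      rw [Nat.toDigitsCore_lens_eq]
      have hn10 : n / 10 < f := by
        have h1 : n / 10 < n := Nat.div_lt_self (by omega) (by omega)
        omega
      have := ih (n / 10) hn10
      have hp : (10 : Nat) ^ ((Nat.toDigitsCore 10 f (n / 10) []).length + 1)
          = 10 * 10 ^ (Nat.toDigitsCore 10 f (n / 10) []).length := by ring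
      have hmod : n % 10 < 10 := Nat.mod_lt _ (by omega)
      have hdm : 10 * (n / 10) + n % 10 = n := Nat.div_add_mod n 10
      omega

theorem toDigits_lt (n : Nat) : n < 10 ^ (Nat.toDigits 10 n).length := by
  exact toDigitsCore_lt (n + 1) n (Nat.lt_succ_self n)

theorem digitLen_succ (x : Nat) :
    (Nat.toDigits 10 (x + 1)).length ≤ (Nat.toDigits 10 x).length + 1 := by
  have h1 := toDigits_lt x
  have h2 : x + 1 < 10 ^ ((Nat.toDigits 10 x).length + 1) := by
    have : (10:Nat) ^ (Nat.toDigits 10 x).length < 10 ^ ((Nat.toDigits 10 x).length + 1) :=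
      Nat.pow_lt_pow_succ (by omega)
    omega
  exact Nat.toDigits_length 10 (x + 1) _ (by omega) h2

theorem digitLen_add (x t : Nat) :
    (Nat.toDigits 10 (x + t)).length ≤ (Nat.toDigits 10 x).length + t := by
  induction t with
  | zero => simp
  | succ t ih =>
    have h1 := digitLen_succ (x + t)
    have e : x + (t + 1) = (x + t) + 1 := by omega
    rw [e]
    omega

theorem toChars_natCast (k : Nat) : PySem.Int.toChars (k : Int) = Nat.toDigits 10 k := by
  simp [PySem.Int.toChars]

-- each kept bullet line adds at least five characters to the running sum
theorem itemSum_take_succ (l : List String) (i : Nat) (hi : i < l.length) :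
    itemSumN (l.take (i + 1)) = itemSumN (l.take i) + (l[i].toList.length + 5) := by
  simp only [itemSumN, ← List.map_take, List.take_succ, List.getElem?_eq_getElem hi,
    Option.toList_some, List.map_append, List.map_cons, List.map_nil, List.sum_append,
    List.sum_cons, List.sum_nil]
  simp [String.length_toList]

theorem itemSum_take_ge (l : List String) (i j : Nat) (hij : i ≤ j) (hj : j ≤ l.length) :
    itemSumN (l.take i) + 5 * (j - i) ≤ itemSumN (l.take j) := by
  induction j with
  | zero =>
    have : i = 0 := by omega
    subst this; simp
  | succ j ih =>
    rcases Nat.lt_or_ge i (j + 1) with h | h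
    · have := ih (by omega) (by omega)
      have := itemSum_take_succ l j (by omega)
      omega
    · have : i = j + 1 := by omega
      subst this; omega

-- phase-1 probe: keeping k < n non-public entries costs the skeleton plus the running sum
theorem probe1_eq (a r ic np : List String) (k : Nat) (hk : k < np.length) :
    PySem.Str.len (buildReport a r ic (np.take k) 0 ((np.length : Int) - (k : Int)))
      = PySem.Str.len (buildReport a r ic [] 0 (np.length : Int))
        + ((itemSumN (np.take k) : Nat) : Int) := by
  rw [buildReport_len a r ic (np.take k) 0 _ le_rfl,
      buildReport_len a r ic [] 0 _ le_rfl]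
  have hlen : (np.take k).length = k := by simp [List.length_take]; omega
  rw [hlen]
  have e1 : (k : Int) + ((np.length : Int) - (k : Int))
      = ((([] : List String).length : Int) + (np.length : Int)) := by simp
  rw [e1]
  have e2 : decide (((np.length : Int) - (k : Int)) ≠ 0) = decide ((np.length : Int) ≠ 0) := by
    rw [decide_eq_decide]
    constructor <;> intro <;> omega
  rw [e2]
  rw [rlen_np _ _ _ _ _ _ _ _ (itemSumN (np.take k)) (itemSumN ([] : List String)) _]
  have htn : ((([] : List String).length : Int) + (np.length : Int)) ≠ 0 := by
    simp only [List.length_nil, Nat.cast_zero, zero_add]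
    omega
  rw [if_pos htn]
  simp [itemSumN]

-- phase-2 probe: cost also tracks the width of the shrinking '… and X more' count
theorem probe2_eq (a r ic np : List String) (k : Nat) (hk : k < ic.length) :
    PySem.Str.len (buildReport a r (ic.take k) [] ((ic.length : Int) - (k : Int)) (np.length : Int))
      = PySem.Str.len (buildReport a r [] [] (ic.length : Int) (np.length : Int))
        + ((itemSumN (ic.take k) : Nat) : Int)
        + ((PySem.Int.toChars ((ic.length : Int) - (k : Int))).length : Int)
        - ((PySem.Int.toChars ((ic.length : Int))).length : Int) := by
  rw [buildReport_len a r (ic.take k) [] _ _ (by omega),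
      buildReport_len a r [] [] _ _ (by omega)]
  have hlen : (ic.take k).length = k := by simp [List.length_take]; omega
  rw [hlen]
  have e1 : (k : Int) + ((ic.length : Int) - (k : Int))
      = ((([] : List String).length : Int) + (ic.length : Int)) := by simp
  rw [e1]
  have hti : ((([] : List String).length : Int) + (ic.length : Int)) ≠ 0 := by
    simp only [List.length_nil, Nat.cast_zero, zero_add]
    omega
  have hoi : ((ic.length : Int) - (k : Int)) ≠ 0 := by omega
  have hoi' : ((ic.length : Int)) ≠ 0 := by omega
  rw [rlen_ic _ _ _ _ _ _ (itemSumN ([] : List String)) _ ((ic.length : Int)) _ _ _ hti hoi hoi']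
  simp [itemSumN]
  ring

-- ===== VERDICT (by name: the statement is the Claim_ definition above) =====
theorem make_comment_spec : Claim_equal_make_comment := by
  intro a r ic np limit _hdom
  unfold Spec_make_comment
  simp only [make_comment, make_comment_alt, PySem.List.slice_to_natCast,
    PySem.List.slice_to_neg_one, PySem.List.len]
  by_cases h0 : PySem.Str.len (buildReport a r ic np 0 0) ≤ limit
  · simp only [if_pos h0]
  · simp only [if_neg h0]
    -- ------- phase 1: non-public truncation -------
    obtain ⟨K, hst, hKle, hK0, hKmax⟩ := enumFold_char np.dropLast
      (fun j acc => PySem.Str.len (buildReport a r ic [] 0 (np.length : Int)) + acc ≤ limit)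
    simp only [] at hst hK0 hKmax
    rw [List.length_dropLast] at hKle
    have hdltake : ∀ t : Nat, t ≤ np.length - 1 → np.dropLast.take t = np.take t := by
      intro t ht
      rw [List.dropLast_eq_take, List.take_take]
      congr 1
      omega
    have htop : buildReport a r ic (np.take np.length) 0 ((np.length : Int) - (np.length : Int))
        = buildReport a r ic np 0 0 := by
      rw [List.take_length, sub_self]
    have hsearch : truncSearch (fun mid =>
        decide (PySem.Str.len (buildReport a r ic (np.take mid) 0
          ((np.length : Int) - (mid : Int))) ≤ limit)) 0 np.length = K := by
      apply search_eq
      · intro i j hij hj hpj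
        simp only [decide_eq_true_eq] at hpj ⊢
        rcases Nat.lt_or_ge j np.length with hjlt | hjge
        · have hilt : i < np.length := by omega
          rw [probe1_eq a r ic np j hjlt] at hpj
          rw [probe1_eq a r ic np i hilt]
          have hmono := itemSum_take_ge np i j hij (by omega)
          have hc : ((itemSumN (np.take i) : Nat) : Int) ≤ ((itemSumN (np.take j) : Nat) : Int) := by
            push_cast
            omega
          omega
        · have hje : j = np.length := by omega
          subst hje
          rw [htop] at hpj
          exact absurd hpj h0
      · exact hKle
      · rcases hK0 with h | ⟨h1, h2⟩
        · exact Or.inl h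
        · refine Or.inr ⟨h1, ?_⟩
          simp only [decide_eq_true_eq]
          have hKlt : K < np.length := by omega
          rw [probe1_eq a r ic np K hKlt]
          rwa [hdltake K (by omega)] at h2
      · intro t ht1 ht2
        simp only [decide_eq_false_iff_not]
        have htlt : t < np.length := by omega
        rw [probe1_eq a r ic np t htlt]
        have hmx := hKmax t ht1 (by rw [List.length_dropLast]; omega)
        rwa [hdltake t (by omega)] at hmx
      · simp only [decide_eq_false_iff_not]
        rw [htop]
        exact h0
    rw [hsearch, hst]
    rw [show (((K : Int), ((itemSumN np.dropLast : Nat) : Int)).1) = (K : Int) from rfl]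
    have hcand : (PySem.Str.len (buildReport a r ic (np.take K) 0
          ((np.length : Int) - (K : Int))) ≤ limit)
        ↔ ((K : Int) > 0 ∨ PySem.Str.len (buildReport a r ic [] 0 (np.length : Int)) ≤ limit) := by
      rcases Nat.eq_zero_or_pos K with hKz | hKp
      · subst hKz
        have hc0 : buildReport a r ic (np.take 0) 0 ((np.length : Int) - ((0 : Nat) : Int))
            = buildReport a r ic [] 0 (np.length : Int) := by
          simp
        rw [hc0]
        simp
      · have hKlt : K < np.length := by omega
        rcases hK0 with h | ⟨h1, h2⟩
        · omega
        · rw [hdltake K (by omega)] at h2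
          rw [probe1_eq a r ic np K hKlt]
          constructor
          · intro _
            left
            omega
          · intro _
            exact h2
    by_cases hB : ((K : Int) > 0 ∨ PySem.Str.len (buildReport a r ic [] 0 (np.length : Int)) ≤ limit)
    · rw [if_pos (hcand.mpr hB), if_pos hB, PySem.List.slice_to_natCast]
    · rw [if_neg (fun hc => hB (hcand.mp hc)), if_neg hB]
      -- ------- phase 2: interface truncation -------
      have hbase : ¬ PySem.Str.len (buildReport a r ic [] 0 (np.length : Int)) ≤ limit := by
        intro hc
        exact hB (Or.inr hc)
      obtain ⟨K2, hst2, hK2le, hK20, hK2max⟩ := enumFold_char ic.dropLast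
        (fun j acc => PySem.Str.len (buildReport a r [] [] (ic.length : Int) (np.length : Int))
          + acc + ((PySem.Int.toChars ((ic.length : Int) - j - 1)).length : Int)
          - ((PySem.Int.toChars ((ic.length : Int))).length : Int) ≤ limit)
      simp only [] at hst2 hK20 hK2max
      rw [List.length_dropLast] at hK2le
      have hdltake2 : ∀ t : Nat, t ≤ ic.length - 1 → ic.dropLast.take t = ic.take t := by
        intro t ht
        rw [List.dropLast_eq_take, List.take_take]
        congr 1
        omega
      have htop2 : buildReport a r (ic.take ic.length) [] ((ic.length : Int) - (ic.length : Int))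
            (np.length : Int)
          = buildReport a r ic [] 0 (np.length : Int) := by
        rw [List.take_length, sub_self]
      -- the cost of keeping t entries, written as the phase-2 probe
      have hT2 : ∀ t : Nat, 1 ≤ t → t ≤ ic.length - 1 →
          ((PySem.Str.len (buildReport a r [] [] (ic.length : Int) (np.length : Int))
            + ((itemSumN (ic.dropLast.take t) : Nat) : Int)
            + ((PySem.Int.toChars ((ic.length : Int) - ((t : Int) - 1) - 1)).length : Int)
            - ((PySem.Int.toChars ((ic.length : Int))).length : Int) ≤ limit)
          ↔ (PySem.Str.len (buildReport a r (ic.take t) [] ((ic.length : Int) - (t : Int))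
              (np.length : Int)) ≤ limit)) := by
        intro t ht1 ht2
        rw [hdltake2 t ht2]
        have he : ((ic.length : Int) - ((t : Int) - 1) - 1) = ((ic.length : Int) - (t : Int)) := by
          ring
        rw [he, probe2_eq a r ic np t (by omega)]
      -- digit-width comparison for downward closure
      have hdig : ∀ i j : Nat, i ≤ j → j < ic.length →
          ((PySem.Int.toChars ((ic.length : Int) - (i : Int))).length : Int)
            ≤ ((PySem.Int.toChars ((ic.length : Int) - (j : Int))).length : Int) + ((j : Int) - (i : Int)) := by
        intro i j hij hj
        have hi' : ((ic.length : Int) - (i : Int)) = (((ic.length - i : Nat)) : Int) := by omega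
        have hj' : ((ic.length : Int) - (j : Int)) = (((ic.length - j : Nat)) : Int) := by omega
        rw [hi', hj', toChars_natCast, toChars_natCast]
        have hadd := digitLen_add (ic.length - j) (j - i)
        have he : ic.length - j + (j - i) = ic.length - i := by omega
        rw [he] at hadd
        push_cast
        omega
      have hsearch2 : truncSearch (fun mid =>
          decide (PySem.Str.len (buildReport a r (ic.take mid) []
            ((ic.length : Int) - (mid : Int)) (np.length : Int)) ≤ limit)) 0 ic.length = K2 := by
        apply search_eq
        · intro i j hij hj hpj
          simp only [decide_eq_true_eq] at hpj ⊢
          rcases Nat.lt_or_ge j ic.length with hjlt | hjge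
          · have hilt : i < ic.length := by omega
            rw [probe2_eq a r ic np j hjlt] at hpj
            rw [probe2_eq a r ic np i hilt]
            have hmono := itemSum_take_ge ic i j hij (by omega)
            have hdd := hdig i j hij hjlt
            push_cast at hmono
            omega
          · have hje : j = ic.length := by omega
            subst hje
            rw [htop2] at hpj
            exact absurd hpj hbase
        · exact hK2le
        · rcases hK20 with h | ⟨h1, h2⟩
          · exact Or.inl h
          · refine Or.inr ⟨h1, ?_⟩
            simp only [decide_eq_true_eq]
            exact (hT2 K2 h1 (by omega)).mp h2
        · intro t ht1 ht2
          simp only [decide_eq_false_iff_not]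
          intro hc
          exact hK2max t ht1 (by rw [List.length_dropLast]; omega)
            ((hT2 t (by omega) (by omega)).mpr hc)
        · simp only [decide_eq_false_iff_not]
          rw [htop2]
          exact hbase
      rw [hsearch2, hst2]
      rw [show (((K2 : Int), ((itemSumN ic.dropLast : Nat) : Int)).1) = (K2 : Int) from rfl]
      rw [PySem.List.slice_to_natCast]
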